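-- pv_equiv track=rewrite | github.com/testingautomated-usi/corrupted-text | foo/text_corruptor.py | _word_start_bags
-- ===== SOURCE A (Python) =====
-- from concurrent.futures import ThreadPoolExecutor
-- from typing import List, Optional, Dict
--
-- MAX_COMMON_START_FOR_AUTOCOMPLETE = 5
--
-- MIN_COMMON_START_FOR_AUTOCOMPLETE = 2
--
-- def _word_start_bags(words: List[str]) -> Dict[int, Dict[str, List[str]]]:
--     """Returns dictionaries of bags with equally starting words for different start sizes."""
--
--     def _group(num_start_chars: int) -> Dict[str, List[str]]:
--         dict_res = dict()
--         for word in words: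
--             if len(word) >= num_start_chars:
--                 start = word[:num_start_chars]
--                 if start not in dict_res:
--                     dict_res[start] = []
--                 dict_res[start].append(word)
--         return dict_res
--
--     with ThreadPoolExecutor() as executor:
--         start_sizes = list(range(MIN_COMMON_START_FOR_AUTOCOMPLETE, MAX_COMMON_START_FOR_AUTOCOMPLETE + 1))
--         dicts = list(executor.map(_group, start_sizes))
--
--     return {start_sizes[i]: dicts[i] for i in range(len(start_sizes))}
-- ===== SOURCE B (Python) =====
-- MAX_COMMON_START_FOR_AUTOCOMPLETE = 5
--
-- MIN_COMMON_START_FOR_AUTOCOMPLETE = 2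
--
-- def _word_start_bags(words):
--     """Single pass over the words, fanning each word out to every applicable start size."""
--     res = {n: {} for n in range(MIN_COMMON_START_FOR_AUTOCOMPLETE, MAX_COMMON_START_FOR_AUTOCOMPLETE + 1)}
--     for word in words:
--         for n in range(MIN_COMMON_START_FOR_AUTOCOMPLETE, min(len(word), MAX_COMMON_START_FOR_AUTOCOMPLETE) + 1):
--             res[n].setdefault(word[:n], []).append(word)
--     return res
-- ===== Notes on version B (the rewrite author's own statement) =====
-- stated objective: simpler
-- what changed: Replaces A's four independent scans of the word list (one _group pass per start size, dispatched through a ThreadPoolExecutor) with a single pass that fans each word out to every applicable start size via setdefault-and-append.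
import Mathlib
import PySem

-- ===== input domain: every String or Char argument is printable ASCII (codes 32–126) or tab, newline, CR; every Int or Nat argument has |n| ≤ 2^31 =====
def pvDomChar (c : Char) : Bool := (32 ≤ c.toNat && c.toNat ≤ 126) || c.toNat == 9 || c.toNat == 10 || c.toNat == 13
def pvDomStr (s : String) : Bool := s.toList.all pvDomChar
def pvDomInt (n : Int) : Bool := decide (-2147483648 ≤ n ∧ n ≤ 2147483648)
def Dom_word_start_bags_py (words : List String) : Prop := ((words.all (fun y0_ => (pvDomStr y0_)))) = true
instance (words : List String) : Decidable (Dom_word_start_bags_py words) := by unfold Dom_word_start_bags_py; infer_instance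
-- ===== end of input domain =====

-- B replaces A's four independent scans of the word list (one _group pass per start size,
-- farmed out to a ThreadPoolExecutor) by a single pass that fans each word out to every
-- applicable bucket size; objective: simpler (the executor and the _group helper disappear).
-- Per the type convention, Python's Dict[int, Dict[str, List[str]]] is rendered as
-- List (Int × List (String × List String)) (association lists in insertion order).

-- ===== PORT A =====
-- A's inner helper `_group(num_start_chars)`: one scan of `words` for one start size.
def wsbGroup (words : List String) (n : Int) : PySem.Dict String (List String) :=
  words.foldl (fun d w =>
    if PySem.Str.len w ≥ n then
      let start := PySem.Str.slice w none (some n)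
      -- `if start not in dict_res: dict_res[start] = []` then `dict_res[start].append(word)`
      let d' := if d.contains start then d else d.insert start []
      d'.modify start [] (fun l => l ++ [w])
    else d) PySem.Dict.empty

def word_start_bags_py (words : List String) : List (Int × List (String × List String)) :=
  let startSizes := PySem.List.pyRange 2 (5 + 1) 1
  -- executor.map(_group, start_sizes): the thread pool returns results in argument order
  let dicts := startSizes.map (fun n => wsbGroup words n)
  -- {start_sizes[i]: dicts[i] for i in range(len(start_sizes))}; indices are in range, so
  -- xs[i] is rendered with pyGetD (the default is never used); inner dicts become items lists
  ((PySem.List.pyRange 0 (startSizes.length : Int) 1).foldl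
     (fun d i => d.insert (PySem.List.pyGetD startSizes i 0)
                          ((PySem.List.pyGetD dicts i PySem.Dict.empty).items))
     PySem.Dict.empty).items

-- ===== PORT B =====
def word_start_bags_py_alt (words : List String) : List (Int × List (String × List String)) :=
  -- res = {n: {} for n in range(2, 6)}
  let init := (PySem.List.pyRange 2 (5 + 1) 1).foldl
      (fun r n => r.insert n (PySem.Dict.empty : PySem.Dict String (List String)))
      PySem.Dict.empty
  let res := words.foldl (fun r w =>
      (PySem.List.pyRange 2 (min (PySem.Str.len w) 5 + 1) 1).foldl
        (fun r n =>
          -- res[n].setdefault(word[:n], []).append(word); key n is always present (2 ≤ n ≤ 5),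
          -- so the outer default Dict.empty is never used
          r.modify n PySem.Dict.empty
            (fun d => d.modify (PySem.Str.slice w none (some n)) [] (fun l => l ++ [w])))
        r) init
  res.items.map (fun p => (p.1, p.2.items))

-- ===== PRECONDITION & SPEC =====
def Spec_word_start_bags_py (words : List String) (out : List (Int × List (String × List String))) : Prop := out = word_start_bags_py_alt words
instance (words : List String) (out : List (Int × List (String × List String))) : Decidable (Spec_word_start_bags_py words out) := by unfold Spec_word_start_bags_py; infer_instance

-- ===== CLAIM (what is proved, stated in full; the proofs are below) =====
def Claim_equal_word_start_bags_py : Prop := ∀ (words : List String), Dom_word_start_bags_py words → Spec_word_start_bags_py words (word_start_bags_py words)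

-- ===== LEMMAS AND PROOFS =====

-- the per-size, per-word update both programs perform, written with a single `modify`
def wsbStep (n : Int) (d : PySem.Dict String (List String)) (w : String) :
    PySem.Dict String (List String) :=
  if PySem.Str.len w ≥ n then
    d.modify (PySem.Str.slice w none (some n)) [] (fun l => l ++ [w])
  else d

-- A's two-step "ensure key, then append" is one `modify`
lemma wsbGroup_eq_foldl_wsbStep (words : List String) (n : Int) :
    wsbGroup words n = words.foldl (wsbStep n) PySem.Dict.empty := by
  unfold wsbGroup
  refine PySem.List.foldl_congr_mem words _ _ _ ?_
  intro d w _
  unfold wsbStep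
  split
  · by_cases hc : d.contains (PySem.Str.slice w none (some n))
    · simp [hc]
    · simp only [Bool.not_eq_true] at hc
      simp [hc, PySem.Dict.modify, PySem.Dict.insert_insert_self,
        PySem.Dict.getD_insert_self, PySem.Dict.getD_of_not_contains _ _ hc]
  · rfl

-- `res.modify n … f` on the literal four-key state, one lemma per key
lemma wsbModify2 (f : PySem.Dict String (List String) → PySem.Dict String (List String))
    (d2 d3 d4 d5 : PySem.Dict String (List String)) :
    (PySem.Dict.mk [((2:Int), d2), (3, d3), (4, d4), (5, d5)]).modify 2 PySem.Dict.empty f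
    = PySem.Dict.mk [(2, f d2), (3, d3), (4, d4), (5, d5)] := by
  simp [PySem.Dict.modify, PySem.Dict.insert, PySem.Dict.getD, PySem.Dict.get?, PySem.Dict.contains]

lemma wsbModify3 (f : PySem.Dict String (List String) → PySem.Dict String (List String))
    (d2 d3 d4 d5 : PySem.Dict String (List String)) :
    (PySem.Dict.mk [((2:Int), d2), (3, d3), (4, d4), (5, d5)]).modify 3 PySem.Dict.empty f
    = PySem.Dict.mk [(2, d2), (3, f d3), (4, d4), (5, d5)] := by
  simp [PySem.Dict.modify, PySem.Dict.insert, PySem.Dict.getD, PySem.Dict.get?, PySem.Dict.contains]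

lemma wsbModify4 (f : PySem.Dict String (List String) → PySem.Dict String (List String))
    (d2 d3 d4 d5 : PySem.Dict String (List String)) :
    (PySem.Dict.mk [((2:Int), d2), (3, d3), (4, d4), (5, d5)]).modify 4 PySem.Dict.empty f
    = PySem.Dict.mk [(2, d2), (3, d3), (4, f d4), (5, d5)] := by
  simp [PySem.Dict.modify, PySem.Dict.insert, PySem.Dict.getD, PySem.Dict.get?, PySem.Dict.contains]

lemma wsbModify5 (f : PySem.Dict String (List String) → PySem.Dict String (List String))
    (d2 d3 d4 d5 : PySem.Dict String (List String)) :
    (PySem.Dict.mk [((2:Int), d2), (3, d3), (4, d4), (5, d5)]).modify 5 PySem.Dict.empty f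
    = PySem.Dict.mk [(2, d2), (3, d3), (4, d4), (5, f d5)] := by
  simp [PySem.Dict.modify, PySem.Dict.insert, PySem.Dict.getD, PySem.Dict.get?, PySem.Dict.contains]

-- B's inner loop on the literal four-key state fans one word out to the four bags
lemma wsbStepB_lit (w : String) (d2 d3 d4 d5 : PySem.Dict String (List String)) :
    (PySem.List.pyRange 2 (min (PySem.Str.len w) 5 + 1) 1).foldl
      (fun r n =>
        r.modify n PySem.Dict.empty
          (fun d => d.modify (PySem.Str.slice w none (some n)) [] (fun l => l ++ [w])))
      (PySem.Dict.mk [(2, d2), (3, d3), (4, d4), (5, d5)])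
    = PySem.Dict.mk [(2, wsbStep 2 d2 w), (3, wsbStep 3 d3 w),
                     (4, wsbStep 4 d4 w), (5, wsbStep 5 d5 w)] := by
  have hL : (0 : Int) ≤ PySem.Str.len w := by
    rw [PySem.Str.len_eq]; exact Int.natCast_nonneg _
  have hcases : PySem.Str.len w = 0 ∨ PySem.Str.len w = 1 ∨ PySem.Str.len w = 2 ∨
      PySem.Str.len w = 3 ∨ PySem.Str.len w = 4 ∨ 5 ≤ PySem.Str.len w := by omega
  rcases hcases with h | h | h | h | h | h
  · rw [h]
    simp only [show PySem.List.pyRange 2 (min (0:Int) 5 + 1) 1 = [] from by decide, List.foldl]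
    simp only [wsbStep, h]
    norm_num
  · rw [h]
    simp only [show PySem.List.pyRange 2 (min (1:Int) 5 + 1) 1 = [] from by decide, List.foldl]
    simp only [wsbStep, h]
    norm_num
  · rw [h]
    simp only [show PySem.List.pyRange 2 (min (2:Int) 5 + 1) 1 = [2] from by decide,
      List.foldl, wsbModify2]
    simp only [wsbStep, h]
    norm_num
  · rw [h]
    simp only [show PySem.List.pyRange 2 (min (3:Int) 5 + 1) 1 = [2, 3] from by decide,
      List.foldl, wsbModify2, wsbModify3]
    simp only [wsbStep, h]
    norm_num
  · rw [h]
    simp only [show PySem.List.pyRange 2 (min (4:Int) 5 + 1) 1 = [2, 3, 4] from by decide,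
      List.foldl, wsbModify2, wsbModify3, wsbModify4]
    simp only [wsbStep, h]
    norm_num
  · have hmin : min (PySem.Str.len w) 5 = 5 := by omega
    rw [hmin]
    simp only [show PySem.List.pyRange 2 ((5:Int) + 1) 1 = [2, 3, 4, 5] from by decide,
      List.foldl, wsbModify2, wsbModify3, wsbModify4, wsbModify5]
    have h2 : PySem.Str.len w ≥ 2 := by omega
    have h3 : PySem.Str.len w ≥ 3 := by omega
    have h4 : PySem.Str.len w ≥ 4 := by omega
    have h5 : PySem.Str.len w ≥ 5 := by omega
    simp only [wsbStep, if_pos h2, if_pos h3, if_pos h4, if_pos h5]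

-- B's outer loop keeps the literal four-key shape, one bag fold per size
lemma wsbFoldB (words : List String) :
    ∀ d2 d3 d4 d5 : PySem.Dict String (List String),
    words.foldl (fun r w =>
      (PySem.List.pyRange 2 (min (PySem.Str.len w) 5 + 1) 1).foldl
        (fun r n =>
          r.modify n PySem.Dict.empty
            (fun d => d.modify (PySem.Str.slice w none (some n)) [] (fun l => l ++ [w])))
        r)
      (PySem.Dict.mk [(2, d2), (3, d3), (4, d4), (5, d5)])
    = PySem.Dict.mk [(2, words.foldl (wsbStep 2) d2), (3, words.foldl (wsbStep 3) d3),
                     (4, words.foldl (wsbStep 4) d4), (5, words.foldl (wsbStep 5) d5)] := by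
  induction words with
  | nil => intro d2 d3 d4 d5; rfl
  | cons w ws ih =>
    intro d2 d3 d4 d5
    simp only [List.foldl_cons, wsbStepB_lit, ih]

-- ===== VERDICT (by name: the statement is the Claim_ definition above) =====
theorem word_start_bags_py_spec : Claim_equal_word_start_bags_py := by
  intro words _
  unfold Spec_word_start_bags_py
  have hA : word_start_bags_py words =
      [(2, (wsbGroup words 2).items), (3, (wsbGroup words 3).items),
       (4, (wsbGroup words 4).items), (5, (wsbGroup words 5).items)] := rfl
  have hB : word_start_bags_py_alt words =
      (words.foldl (fun r w =>
          (PySem.List.pyRange 2 (min (PySem.Str.len w) 5 + 1) 1).foldl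
            (fun r n =>
              r.modify n PySem.Dict.empty
                (fun d => d.modify (PySem.Str.slice w none (some n)) [] (fun l => l ++ [w])))
            r)
          (PySem.Dict.mk [(2, PySem.Dict.empty), (3, PySem.Dict.empty),
                          (4, PySem.Dict.empty), (5, PySem.Dict.empty)])).items.map
        (fun p => (p.1, p.2.items)) := rfl
  rw [hA, hB, wsbFoldB]
  simp only [wsbGroup_eq_foldl_wsbStep]
  rfl
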